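-- pv_equiv track=rewrite | github.com/cihanfirat/CS50P-Solutions | Week 5/test_plates/plates.py | numbers_in_middle
-- ===== SOURCE A (Python) =====
-- def numbers_in_middle(s):
--     seen_digit = False
--
--     for i in range(len(s)):
--         if s[i].isdigit():
--             if s[i] == "0" and not seen_digit:
--                 return False  # İlk sayı '0' olamaz
--             seen_digit = True
--         elif seen_digit:
--             return False  # Bir sayıdan sonra harf gelirse geçersiz olur
--     return True
-- ===== SOURCE B (Python) =====
-- def numbers_in_middle(s):
--     i = next((j for j, c in enumerate(s) if c.isdigit()), None)
--     if i is None: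
--         return True
--     if s[i] == "0":
--         return False
--     return all(c.isdigit() for c in s[i:])
-- ===== Notes on version B (the rewrite author's own statement) =====
-- stated objective: alternative
-- what changed: Replaces A's stateful scan with a seen_digit flag by a find-then-verify decomposition: locate the first digit, reject a leading zero, and verify the entire suffix from that digit consists of digits.
import Mathlib
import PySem

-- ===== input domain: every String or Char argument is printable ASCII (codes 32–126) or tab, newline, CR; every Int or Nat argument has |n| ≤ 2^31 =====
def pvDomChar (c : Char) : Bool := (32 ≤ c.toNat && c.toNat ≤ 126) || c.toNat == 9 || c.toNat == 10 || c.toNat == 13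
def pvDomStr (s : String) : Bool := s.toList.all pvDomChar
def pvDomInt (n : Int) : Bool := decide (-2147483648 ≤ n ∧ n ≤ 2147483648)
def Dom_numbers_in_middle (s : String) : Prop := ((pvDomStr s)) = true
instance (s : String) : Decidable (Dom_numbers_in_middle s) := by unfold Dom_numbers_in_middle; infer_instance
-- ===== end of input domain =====

-- B replaces A's single stateful scan with a find-first-digit-then-verify-suffix decomposition; same O(n) cost.

-- ===== PORT A =====
-- A's index loop over s with the seen_digit flag, as structural recursion over the characters in order.
def pvALoop : List Char → Bool → Bool
  | [], _ => true
  | c :: rest, seen =>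
    if PySem.Chars.isdigit c then
      if c = '0' && !seen then false
      else pvALoop rest true
    else if seen then false
    else pvALoop rest seen

def numbers_in_middle (s : String) : Bool := pvALoop s.toList false

-- ===== PORT B =====
-- first digit's suffix via dropWhile (= next over enumerate in Source B); empty → True; '0' first → False; else all digits.
def numbers_in_middle_alt (s : String) : Bool :=
  match s.toList.dropWhile (fun c => !PySem.Chars.isdigit c) with
  | [] => true
  | c :: rest => if c = '0' then false else (c :: rest).all PySem.Chars.isdigit

-- ===== PRECONDITION & SPEC =====
def Spec_numbers_in_middle (s : String) (out : Bool) : Prop := out = numbers_in_middle_alt s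
instance (s : String) (out : Bool) : Decidable (Spec_numbers_in_middle s out) := by unfold Spec_numbers_in_middle; infer_instance

-- ===== CLAIM (what is proved, stated in full; the proofs are below) =====
def Claim_equal_numbers_in_middle : Prop := ∀ (s : String), Dom_numbers_in_middle s → Spec_numbers_in_middle s (numbers_in_middle s)

-- ===== LEMMAS AND PROOFS =====
theorem pvALoop_true_eq_all (l : List Char) : pvALoop l true = l.all PySem.Chars.isdigit := by
  induction l with
  | nil => rfl
  | cons c rest ih =>
    simp only [pvALoop, List.all_cons]
    by_cases h : PySem.Chars.isdigit c
    · simp [h, ih]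
    · simp [h]

theorem pvALoop_false_eq_alt (l : List Char) :
    pvALoop l false =
      (match l.dropWhile (fun c => !PySem.Chars.isdigit c) with
       | [] => true
       | c :: rest => if c = '0' then false else (c :: rest).all PySem.Chars.isdigit) := by
  induction l with
  | nil => rfl
  | cons c rest ih =>
    by_cases h : PySem.Chars.isdigit c
    · simp only [pvALoop, h, if_true, List.dropWhile_cons, h, Bool.not_true, if_false]
      by_cases h0 : c = '0'
      · simp [h0]
      · simp [h0, pvALoop_true_eq_all, List.all_cons, h]
    · simp only [pvALoop, h, if_false, List.dropWhile_cons, Bool.not_eq_true', Bool.not_false]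
      simpa [h] using ih

-- ===== VERDICT (by name: the statement is the Claim_ definition above) =====
theorem numbers_in_middle_spec : Claim_equal_numbers_in_middle := by
  intro s _
  unfold Spec_numbers_in_middle numbers_in_middle numbers_in_middle_alt
  exact pvALoop_false_eq_alt s.toList
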